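-- pv_equiv track=rewrite | github.com/caoqing-ruijing/ECG_EKnet | train_self_learning_EKPnet.py | get_leads_n_patch
-- ===== SOURCE A (Python) =====
-- import math
--
-- def get_leads_n_patch(num_tokens,leads_default_order):
--     leads_n_patch = []
--
--     n_patch_per_lead = int(num_tokens/len(leads_default_order))
--     for lead_i in leads_default_order:
--         draw_token_inx = math.ceil(n_patch_per_lead/2)
--         for local_token_i in range(n_patch_per_lead):
--             if local_token_i == draw_token_inx:
--                 leads_n_patch.append('{}'.format(lead_i))
--             else:
--                 leads_n_patch.append('')
--     assert len(leads_n_patch)==num_tokens,f'leads_n_patch {len(leads_n_patch)} != num_tokens {num_tokens}'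
--     return  leads_n_patch,n_patch_per_lead
-- ===== SOURCE B (Python) =====
-- import math
--
-- def get_leads_n_patch(num_tokens, leads_default_order):
--     n_patch_per_lead = int(num_tokens / len(leads_default_order))
--     draw_token_inx = math.ceil(n_patch_per_lead / 2)
--     leads_n_patch = [''] * (n_patch_per_lead * len(leads_default_order))
--     for idx, lead_i in enumerate(leads_default_order):
--         if draw_token_inx < n_patch_per_lead:
--             leads_n_patch[idx * n_patch_per_lead + draw_token_inx] = '{}'.format(lead_i)
--     assert len(leads_n_patch) == num_tokens, f'leads_n_patch {len(leads_n_patch)} != num_tokens {num_tokens}'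
--     return leads_n_patch, n_patch_per_lead
-- ===== Notes on version B (the rewrite author's own statement) =====
-- stated objective: alternative
-- what changed: B pre-allocates the whole output with [''] * total and writes the single lead label per block by one index assignment per lead, replacing A's nested per-token append loop.
import Mathlib
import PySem

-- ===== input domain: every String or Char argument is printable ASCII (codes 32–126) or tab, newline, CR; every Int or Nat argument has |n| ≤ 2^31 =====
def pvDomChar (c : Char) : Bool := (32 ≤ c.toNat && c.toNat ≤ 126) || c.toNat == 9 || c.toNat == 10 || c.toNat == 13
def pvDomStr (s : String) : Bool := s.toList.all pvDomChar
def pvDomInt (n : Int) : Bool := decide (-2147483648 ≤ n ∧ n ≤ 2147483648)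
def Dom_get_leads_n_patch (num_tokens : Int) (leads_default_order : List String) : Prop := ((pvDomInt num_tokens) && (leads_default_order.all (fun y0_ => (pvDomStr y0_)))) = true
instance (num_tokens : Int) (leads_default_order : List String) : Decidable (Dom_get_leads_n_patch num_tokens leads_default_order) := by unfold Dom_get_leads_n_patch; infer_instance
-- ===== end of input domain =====

-- B pre-allocates the output and writes one label per lead block by index assignment
-- instead of A's nested append loop; same return value on Pre_ (alternative decomposition).

-- ===== PORT A =====
-- A: nested loops, appending '' or the lead label token by token.
def get_leads_n_patch (num_tokens : Int) (leads_default_order : List String) : List String × Int :=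
  -- int(num_tokens/len(...)): float division then int(); exact trunc-division for |num_tokens| ≤ 2^31
  let n_patch_per_lead : Int := PySem.Int.truncdiv num_tokens (leads_default_order.length : Int)
  let leads_n_patch : List String :=
    leads_default_order.foldl (fun acc lead_i =>
      -- math.ceil(n/2), exact for |n| ≤ 2^31
      let draw_token_inx : Int := PySem.Int.floordiv (n_patch_per_lead + 1) 2
      (PySem.List.pyRange 0 n_patch_per_lead 1).foldl (fun acc2 local_token_i =>
        if local_token_i = draw_token_inx then acc2 ++ [lead_i] else acc2 ++ [""]) acc) []
  -- the assert holds on Pre_get_leads_n_patch (it raises exactly outside Pre_)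
  (leads_n_patch, n_patch_per_lead)

-- ===== PORT B =====
def get_leads_n_patch_alt (num_tokens : Int) (leads_default_order : List String) : List String × Int :=
  let n_patch_per_lead : Int := PySem.Int.truncdiv num_tokens (leads_default_order.length : Int)
  let draw_token_inx : Int := PySem.Int.floordiv (n_patch_per_lead + 1) 2
  let init : List String := List.replicate (n_patch_per_lead * (leads_default_order.length : Int)).toNat ""
  let out : List String :=
    (PySem.List.enumerate leads_default_order 0).foldl (fun acc p =>
      if draw_token_inx < n_patch_per_lead then
        acc.set (p.1.toNat * n_patch_per_lead.toNat + draw_token_inx.toNat) p.2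
      else acc) init
  (out, n_patch_per_lead)

-- ===== PRECONDITION & SPEC =====
-- Pre_ excludes exactly the inputs where the Python A raises: ZeroDivisionError on an empty
-- lead list, and AssertionError whenever num_tokens is negative or not a multiple of the
-- number of leads (then len(leads_n_patch) != num_tokens). B raises on exactly the same inputs.
def Pre_get_leads_n_patch (num_tokens : Int) (leads_default_order : List String) : Prop :=
  leads_default_order ≠ [] ∧ 0 ≤ num_tokens ∧ (leads_default_order.length : Int) ∣ num_tokens
instance (num_tokens : Int) (leads_default_order : List String) : Decidable (Pre_get_leads_n_patch num_tokens leads_default_order) := by unfold Pre_get_leads_n_patch; infer_instance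
def pvWitness_get_leads_n_patch : Int × List String := (6, ["I", "II"])

def Spec_get_leads_n_patch (num_tokens : Int) (leads_default_order : List String) (out : List String × Int) : Prop := out = get_leads_n_patch_alt num_tokens leads_default_order
instance (num_tokens : Int) (leads_default_order : List String) (out : List String × Int) : Decidable (Spec_get_leads_n_patch num_tokens leads_default_order out) := by unfold Spec_get_leads_n_patch; infer_instance

-- ===== CLAIM (what is proved, stated in full; the proofs are below) =====
def Claim_equal_get_leads_n_patch : Prop := ∀ (num_tokens : Int) (leads_default_order : List String), Dom_get_leads_n_patch num_tokens leads_default_order → Pre_get_leads_n_patch num_tokens leads_default_order → Spec_get_leads_n_patch num_tokens leads_default_order (get_leads_n_patch num_tokens leads_default_order)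

-- ===== LEMMAS AND PROOFS =====

-- the per-lead block both programs produce
def pvBlock (m d : Nat) (lead : String) : List String :=
  if d < m then (List.replicate m "").set d lead else List.replicate m ""

theorem pvBlock_length (m d : Nat) (lead : String) : (pvBlock m d lead).length = m := by
  unfold pvBlock; split <;> simp

-- A's inner loop over range(n) produces exactly pvBlock (for 0 ≤ d)
theorem pvInner_eq (n d : Int) (hd : 0 ≤ d) (lead : String) (acc : List String) :
    (PySem.List.pyRange 0 n 1).foldl (fun acc2 i =>
        if i = d then acc2 ++ [lead] else acc2 ++ [""]) acc
      = acc ++ pvBlock n.toNat d.toNat lead := by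
  rw [show (fun (acc2 : List String) (i : Int) =>
        if i = d then acc2 ++ [lead] else acc2 ++ [""])
      = (fun acc2 i => acc2 ++ [if i = d then lead else ""]) by
    funext acc2 i; split <;> simp_all]
  rw [PySem.List.foldl_append_singleton_eq_map]
  congr 1
  rw [PySem.List.pyRange_one]
  simp only [List.map_map, Int.sub_zero]
  apply List.ext_getElem
  · simp [pvBlock_length]
  · intro j h1 h2
    have hjn : j < n.toNat := by
      have := h2; rwa [pvBlock_length] at this
    simp only [List.getElem_map, List.getElem_range, Function.comp]
    by_cases hlt : d.toNat < n.toNat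
    · simp only [pvBlock, if_pos hlt, List.getElem_set, List.getElem_replicate]
      by_cases hj : d.toNat = j
      · have : (0 : Int) + (j : Int) = d := by omega
        simp [this, hj]
      · have hne' : ¬ ((j : Int) = d) := by omega
        simp [hne', hj]
    · simp only [pvBlock, if_neg hlt, List.getElem_replicate]
      have hne' : ¬ ((j : Int) = d) := by omega
      simp [hne']

-- A's double loop = flatMap of blocks
theorem pvA_flat (leads : List String) (n d : Int) (hd : 0 ≤ d) (acc : List String) :
    leads.foldl (fun acc lead =>
        (PySem.List.pyRange 0 n 1).foldl (fun acc2 i =>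
          if i = d then acc2 ++ [lead] else acc2 ++ [""]) acc) acc
      = acc ++ leads.flatMap (fun lead => pvBlock n.toNat d.toNat lead) := by
  induction leads generalizing acc with
  | nil => simp
  | cons x xs ih =>
    rw [List.foldl_cons, pvInner_eq n d hd, ih]
    simp [List.flatMap_cons, List.append_assoc]

-- B's fold over enumerate, generalized: prefix P of length k*m already written
theorem pvB_flat (leads : List String) (m d : Nat) (hdm : d < m) (k : Int) (hk : 0 ≤ k)
    (P : List String) (hP : P.length = k.toNat * m) :
    (PySem.List.enumerate leads k).foldl (fun acc p =>
        acc.set (p.1.toNat * m + d) p.2) (P ++ List.replicate (leads.length * m) "")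
      = P ++ leads.flatMap (fun lead => pvBlock m d lead) := by
  induction leads generalizing k P with
  | nil => simp
  | cons x xs ih =>
    rw [PySem.List.enumerate_cons, List.foldl_cons]
    have hset : (P ++ List.replicate ((x :: xs).length * m) "").set (k.toNat * m + d) x
        = (P ++ pvBlock m d x) ++ List.replicate (xs.length * m) "" := by
      have hrep : List.replicate ((x :: xs).length * m) ("" : String)
          = List.replicate m "" ++ List.replicate (xs.length * m) "" := by
        rw [show (x :: xs).length * m = m + xs.length * m from by
          simp [List.length_cons]; ring, List.replicate_add]
      rw [hrep, List.set_append, if_neg (by omega), hP]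
      have h0 : k.toNat * m + d - k.toNat * m = d := by omega
      rw [h0, List.set_append, if_pos (by simpa using hdm)]
      simp [pvBlock, hdm]
    rw [hset]
    rw [ih (k + 1) (by omega) (P ++ pvBlock m d x)
      (by rw [List.length_append, hP, pvBlock_length]
          have h1 : (k + 1).toNat = k.toNat + 1 := by omega
          rw [h1]; ring)]
    simp [List.flatMap_cons, List.append_assoc]

theorem pvB_flat0 (leads : List String) (m d : Nat) (hdm : d < m) :
    (PySem.List.enumerate leads 0).foldl (fun acc p =>
        acc.set (p.1.toNat * m + d) p.2) (List.replicate (leads.length * m) "")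
      = leads.flatMap (fun lead => pvBlock m d lead) := by
  simpa using pvB_flat leads m d hdm 0 le_rfl [] (by simp)

theorem pvFlat_const (leads : List String) (m : Nat) :
    leads.flatMap (fun _ => List.replicate m ("" : String))
      = List.replicate (leads.length * m) "" := by
  induction leads with
  | nil => simp
  | cons x xs ih =>
    rw [List.flatMap_cons, ih, show (x :: xs).length * m = m + xs.length * m from by
      simp [List.length_cons]; ring, List.replicate_add]

theorem pv_main (num_tokens : Int) (leads : List String)
    (hpre : Pre_get_leads_n_patch num_tokens leads) :
    get_leads_n_patch num_tokens leads = get_leads_n_patch_alt num_tokens leads := by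
  obtain ⟨hne, hnn, hdvd⟩ := hpre
  have hL : 0 < leads.length := List.length_pos_of_ne_nil hne
  unfold get_leads_n_patch get_leads_n_patch_alt
  set n : Int := PySem.Int.truncdiv num_tokens (leads.length : Int) with hn
  set d : Int := PySem.Int.floordiv (n + 1) 2 with hdd
  have hn0 : 0 ≤ n := by
    rw [hn, PySem.Int.truncdiv]
    exact Int.tdiv_nonneg hnn (by positivity)
  have hd2 : d = (n + 1) / 2 := hdd.trans (PySem.Int.floordiv_eq_ediv_of_pos (by norm_num))
  have hd0 : 0 ≤ d := by omega
  simp only [Prod.mk.injEq, and_true]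
  rw [pvA_flat leads n d hd0 []]
  by_cases hguard : d < n
  · have hdm : d.toNat < n.toNat := by omega
    have hrw : (fun (acc : List String) (p : Int × String) =>
          if d < n then acc.set (p.1.toNat * n.toNat + d.toNat) p.2 else acc)
        = (fun acc p => acc.set (p.1.toNat * n.toNat + d.toNat) p.2) := by
      funext acc p; rw [if_pos hguard]
    rw [hrw]
    have hinit : (n * (leads.length : Int)).toNat = leads.length * n.toNat := by
      rw [Int.toNat_mul hn0 (by positivity)]; simp [Nat.mul_comm]
    rw [hinit, pvB_flat0 leads n.toNat d.toNat hdm]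
    simp
  · -- draw ≥ n (only possible for n ≤ 1): every block is all-'' and B writes nothing
    have hn1 : n ≤ 1 := by omega
    have hrw2 : (fun (acc : List String) (p : Int × String) =>
          if d < n then acc.set (p.1.toNat * n.toNat + d.toNat) p.2 else acc)
        = (fun acc _ => acc) := by
      funext acc p; rw [if_neg hguard]
    rw [hrw2, List.foldl_fixed]
    have hblock : ∀ lead : String, pvBlock n.toNat d.toNat lead = List.replicate n.toNat "" := by
      intro lead; unfold pvBlock; rw [if_neg (by omega)]
    simp only [hblock, List.nil_append]
    rw [pvFlat_const]
    congr 1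
    rw [Int.toNat_mul hn0 (by positivity)]; simp [Nat.mul_comm]

-- ===== VERDICT (by name: the statement is the Claim_ definition above) =====
theorem get_leads_n_patch_spec : Claim_equal_get_leads_n_patch := by
  intro nt leads _ hpre
  unfold Spec_get_leads_n_patch
  exact pv_main nt leads hpre
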